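-- pv_equiv track=rewrite | github.com/pypi-data/pypi-mirror-395 | packages/hil-testbench/hil_testbench-0.1.2.tar.gz/hil_testbench-0.1.2/hil_testbench/run/orchestration/result_aggregator.py | _stderr_error_hint
-- ===== SOURCE A (Python) =====
-- def _stderr_error_hint(stderr: str | None) -> str | None:
--     if not stderr:
--         return None
--     for line in stderr.strip().split("\n"):
--         stripped = line.strip()
--         if stripped:
--             return stripped[:200]
--     return None
-- ===== SOURCE B (Python) =====
-- def _stderr_error_hint(stderr):
--     if not stderr:
--         return None
--     s = stderr.strip()
--     if not s:
--         return None
--     # after strip() the text starts with a non-whitespace char, so the first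
--     # split piece always strips to something non-empty: no loop needed
--     return s.split("\n", 1)[0].strip()[:200]
-- ===== Notes on version B (the rewrite author's own statement) =====
-- stated objective: simpler
-- what changed: Replaces A's line-by-line scan with a direct computation: after strip() the first split piece (maxsplit 1) is the unique first non-empty line, so B computes it without any loop.
import Mathlib
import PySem

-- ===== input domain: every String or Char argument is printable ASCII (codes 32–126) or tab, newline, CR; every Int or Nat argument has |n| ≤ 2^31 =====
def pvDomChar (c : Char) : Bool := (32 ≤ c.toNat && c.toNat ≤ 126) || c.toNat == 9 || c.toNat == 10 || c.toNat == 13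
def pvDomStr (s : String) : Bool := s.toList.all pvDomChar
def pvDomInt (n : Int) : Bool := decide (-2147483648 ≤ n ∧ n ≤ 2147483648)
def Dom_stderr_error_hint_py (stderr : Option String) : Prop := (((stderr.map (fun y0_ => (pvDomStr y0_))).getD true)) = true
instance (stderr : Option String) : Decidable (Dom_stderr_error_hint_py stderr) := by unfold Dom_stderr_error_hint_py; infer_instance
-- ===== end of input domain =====

-- B replaces A's line-by-line scan with a loop-free first-line computation (objective: simpler).

-- ===== PORT A =====
-- the for-loop over stderr.strip().split("\n"): return first non-empty stripped line[:200]
def pvLoopA : List (List Char) → Option (List Char)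
  | [] => none
  | line :: rest =>
    let stripped := PySem.Chars.strip line
    if stripped = [] then pvLoopA rest
    else some (PySem.List.slice stripped none (some 200))

def stderr_error_hint_py (stderr : Option String) : Option String :=
  match stderr with
  | none => none
  | some s =>
    if s.toList = [] then none   -- `if not stderr` (None handled above)
    else (pvLoopA (PySem.Chars.splitOn (PySem.Chars.strip s.toList) ['\n'])).map
           (fun cs => String.ofList cs)

-- ===== PORT B =====
def stderr_error_hint_py_alt (stderr : Option String) : Option String :=
  match stderr with
  | none => none
  | some str =>
    if str.toList = [] then none   -- `if not stderr`
    else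
      let s := PySem.Chars.strip str.toList
      if s = [] then none          -- `if not s`
      else
        -- s.split("\n", 1)[0]: a split result is never empty, so [0] is exactly its head
        some (String.ofList (PySem.List.slice
          (PySem.Chars.strip ((PySem.Chars.splitOnMax s ['\n'] 1).headD []))
          none (some 200)))

-- ===== PRECONDITION & SPEC =====
def Spec_stderr_error_hint_py (stderr : Option String) (out : Option String) : Prop := out = stderr_error_hint_py_alt stderr
instance (stderr : Option String) (out : Option String) : Decidable (Spec_stderr_error_hint_py stderr out) := by unfold Spec_stderr_error_hint_py; infer_instance

-- ===== CLAIM (what is proved, stated in full; the proofs are below) =====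
def Claim_equal_stderr_error_hint_py : Prop := ∀ (stderr : Option String), Dom_stderr_error_hint_py stderr → Spec_stderr_error_hint_py stderr (stderr_error_hint_py stderr)

-- ===== LEMMAS AND PROOFS =====

-- splitOn.go: once the accumulator is non-empty, the head of the result is its bottom element
lemma goA_acc (fuel : Nat) (l cur : List Char) (acc : List (List Char)) (a : List Char) :
    (PySem.Chars.splitOn.go ['\n'] fuel l cur (acc ++ [a])).head? = some a := by
  induction fuel generalizing l cur acc with
  | zero => simp [PySem.Chars.splitOn.go]
  | succ f ih =>
    cases l with
    | nil => simp [PySem.Chars.splitOn.go]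
    | cons c rest =>
      simp only [PySem.Chars.splitOn.go]
      split
      · have := ih (List.drop 1 (c :: rest)) [] (cur.reverse :: acc)
        simpa using this
      · exact ih rest (c :: cur) acc

lemma goA_head (l : List Char) : ∀ (fuel : Nat) (cur : List Char), l.length ≤ fuel →
    (PySem.Chars.splitOn.go ['\n'] fuel l cur []).head? =
      some (cur.reverse ++ l.takeWhile (· ≠ '\n')) := by
  induction l with
  | nil => intro fuel cur _; cases fuel <;> simp [PySem.Chars.splitOn.go]
  | cons c rest ih =>
    intro fuel cur h
    cases fuel with
    | zero => simp at h
    | succ f =>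
      simp only [PySem.Chars.splitOn.go]
      split
      · rename_i hp
        have hc : c = '\n' := by
          have h2 := hp; simp [List.isPrefixOf] at h2; exact h2.symm
        have hgo := goA_acc f rest [] [] cur.reverse
        simp only [List.nil_append] at hgo
        have hdrop : List.drop (['\n'].length) (c :: rest) = rest := by simp
        rw [hdrop, hgo]
        simp [List.takeWhile, hc]
      · rename_i hp
        have hc : ¬ (c = '\n') := fun hcc => hp (by simp [List.isPrefixOf, hcc])
        have := ih f (c :: cur) (by simpa using Nat.le_of_succ_le_succ h)
        rw [this]
        simp [List.takeWhile, hc]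

-- splitOnMax.go, same two facts
lemma goB_acc (fuel : Nat) (m : Nat) (l cur : List Char) (acc : List (List Char)) (a : List Char) :
    (PySem.Chars.splitOnMax.go ['\n'] fuel m l cur (acc ++ [a])).head? = some a := by
  induction fuel generalizing m l cur acc with
  | zero => simp [PySem.Chars.splitOnMax.go]
  | succ f ih =>
    cases l with
    | nil => simp [PySem.Chars.splitOnMax.go]
    | cons c rest =>
      simp only [PySem.Chars.splitOnMax.go]
      split
      · simp
      · split
        · have := ih (m - 1) (List.drop 1 (c :: rest)) [] (cur.reverse :: acc)
          simpa using this
        · exact ih m rest (c :: cur) acc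

lemma goB_head (l : List Char) : ∀ (fuel : Nat) (cur : List Char), l.length ≤ fuel →
    (PySem.Chars.splitOnMax.go ['\n'] fuel 1 l cur []).head? =
      some (cur.reverse ++ l.takeWhile (· ≠ '\n')) := by
  induction l with
  | nil => intro fuel cur _; cases fuel <;> simp [PySem.Chars.splitOnMax.go]
  | cons c rest ih =>
    intro fuel cur h
    cases fuel with
    | zero => simp at h
    | succ f =>
      simp only [PySem.Chars.splitOnMax.go]
      rw [if_neg (by omega)]
      split
      · rename_i hp
        have hc : c = '\n' := by
          have h2 := hp; simp [List.isPrefixOf] at h2; exact h2.symm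
        have hgo := goB_acc f (1 - 1) rest [] [] cur.reverse
        simp only [List.nil_append] at hgo
        have hdrop : List.drop (['\n'].length) (c :: rest) = rest := by simp
        rw [hdrop, hgo]
        simp [List.takeWhile, hc]
      · rename_i hp
        have hc : ¬ (c = '\n') := fun hcc => hp (by simp [List.isPrefixOf, hcc])
        have := ih f (c :: cur) (by simpa using Nat.le_of_succ_le_succ h)
        rw [this]
        simp [List.takeWhile, hc]

-- a stripped non-empty string starts with a non-whitespace character
lemma strip_head_not_space (s : List Char) (c : Char) (cs : List Char)
    (h : PySem.Chars.strip s = c :: cs) : PySem.Chars.isspace c = false := by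
  have hpre : PySem.Chars.strip s <+: PySem.Chars.lstrip s := by
    have hsuf : (PySem.Chars.lstrip s).reverse.dropWhile PySem.Chars.isspace <:+
        (PySem.Chars.lstrip s).reverse := List.dropWhile_suffix _
    have := List.reverse_prefix.mpr hsuf
    simpa [PySem.Chars.strip, PySem.Chars.rstrip] using this
  rw [h] at hpre
  obtain ⟨t, ht⟩ := hpre
  have : PySem.Chars.lstrip s = c :: (cs ++ t) := by simpa using ht.symm
  have hd := List.head?_dropWhile_not PySem.Chars.isspace s
  simp only [PySem.Chars.lstrip] at this
  rw [this] at hd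
  simpa using hd

-- stripping a list that starts with a non-whitespace character gives a non-empty list
lemma strip_ne_nil_of_head (c : Char) (w : List Char) (hc : PySem.Chars.isspace c = false) :
    PySem.Chars.strip (c :: w) ≠ [] := by
  intro hnil
  simp only [PySem.Chars.strip, PySem.Chars.lstrip, PySem.Chars.rstrip,
    List.dropWhile_cons, hc, Bool.false_eq_true, if_false] at hnil
  have := List.reverse_eq_nil_iff.mp hnil
  have hall := List.dropWhile_eq_nil_iff.mp this
  have := hall c (by simp)
  simp [hc] at this

lemma newline_space : PySem.Chars.isspace '\n' = true := by decide

-- the core fact: on a stripped non-empty text, A's loop returns exactly B's first-piece value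
lemma main_eq (s : List Char) (hne : PySem.Chars.strip s ≠ []) :
    pvLoopA (PySem.Chars.splitOn (PySem.Chars.strip s) ['\n']) =
      some (PySem.List.slice
        (PySem.Chars.strip ((PySem.Chars.splitOnMax (PySem.Chars.strip s) ['\n'] 1).headD []))
        none (some 200)) := by
  obtain ⟨c, cs, hcc⟩ : ∃ c cs, PySem.Chars.strip s = c :: cs := by
    cases h : PySem.Chars.strip s with
    | nil => exact absurd h hne
    | cons c cs => exact ⟨c, cs, rfl⟩
  have hc : PySem.Chars.isspace c = false := strip_head_not_space s c cs hcc
  have hcn : ¬ (c = '\n') := by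
    intro h; rw [h] at hc; rw [newline_space] at hc; exact absurd hc (by simp)
  set t := PySem.Chars.strip s with ht
  -- heads of both splits are the same first segment
  have hA : (PySem.Chars.splitOn t ['\n']).head? = some (t.takeWhile (· ≠ '\n')) := by
    have := goA_head t (t.length + 1) [] (by omega)
    simpa [PySem.Chars.splitOn] using this
  have hB : (PySem.Chars.splitOnMax t ['\n'] 1).head? = some (t.takeWhile (· ≠ '\n')) := by
    have := goB_head t (t.length + 1) [] (by omega)
    simp only [PySem.Chars.splitOnMax]
    rw [if_neg (by omega)]
    simpa using this
  have htw : t.takeWhile (· ≠ '\n') = c :: cs.takeWhile (· ≠ '\n') := by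
    rw [hcc]; simp [List.takeWhile, hcn]
  have hsne : PySem.Chars.strip (t.takeWhile (· ≠ '\n')) ≠ [] := by
    rw [htw]; exact strip_ne_nil_of_head c _ hc
  obtain ⟨rest, hrest⟩ := List.head?_eq_some_iff.mp hA
  rw [hrest]
  simp only [pvLoopA, if_neg hsne]
  have : (PySem.Chars.splitOnMax t ['\n'] 1).headD [] = t.takeWhile (· ≠ '\n') := by
    cases hx : PySem.Chars.splitOnMax t ['\n'] 1 with
    | nil => simp [hx] at hB
    | cons a r => rw [hx] at hB; simp at hB; simp [hB]
  rw [this]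

lemma splitOn_nil : PySem.Chars.splitOn [] ['\n'] = [[]] := by
  simp [PySem.Chars.splitOn, PySem.Chars.splitOn.go]

-- ===== VERDICT (by name: the statement is the Claim_ definition above) =====
theorem stderr_error_hint_py_spec : Claim_equal_stderr_error_hint_py := by
  intro stderr _
  unfold Spec_stderr_error_hint_py stderr_error_hint_py stderr_error_hint_py_alt
  cases stderr with
  | none => rfl
  | some s =>
    by_cases hnil : s.toList = []
    · simp [hnil]
    · simp only [if_neg hnil]
      by_cases hstrip : PySem.Chars.strip s.toList = []
      · rw [hstrip, splitOn_nil]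
        simp [pvLoopA, PySem.Chars.strip, PySem.Chars.lstrip, PySem.Chars.rstrip]
      · rw [main_eq s.toList hstrip]
        simp [hstrip]
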